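-- pv_equiv track=rewrite | github.com/zdu881/autodri | gaze_onnx/experiments/build_gaze_review_alignment.py | nearest_by_frame
-- ===== SOURCE A (Python) =====
-- from bisect import bisect_left
-- from typing import Dict, List, Optional, Tuple
--
-- def nearest_by_frame(items: List[Tuple[int, int, Dict[str, str]]], frame_id: int) -> Tuple[Optional[int], Optional[int], Optional[Dict[str, str]]]:
--     if not items:
--         return None, None, None
--     frames = [x[0] for x in items]
--     pos = bisect_left(frames, frame_id)
--     cand = []
--     if pos < len(items):
--         cand.append(items[pos])
--     if pos > 0:
--         cand.append(items[pos - 1])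
--     best = min(cand, key=lambda x: abs(x[0] - frame_id))
--     return best[1], abs(best[0] - frame_id), best[2]
-- ===== SOURCE B (Python) =====
-- def nearest_by_frame(items, frame_id):
--     if not items:
--         return None, None, None
--
--     def dist(it):
--         return abs(it[0] - frame_id)
--
--     # Divide and conquer on list halves, carrying the two neighbour candidates
--     # (element just below / just at-or-above frame_id) through the recursion:
--     # no frames list, no insertion index, no candidate list, no min().
--     def go(seg, lcand, rcand):
--         if not seg:
--             if rcand is None:
--                 return lcand
--             if lcand is None or dist(rcand) <= dist(lcand):
--                 return rcand
--             return lcand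
--         m = len(seg) // 2
--         if seg[m][0] < frame_id:
--             return go(seg[m + 1:], seg[m], rcand)
--         return go(seg[:m], lcand, seg[m])
--
--     best = go(items, None, None)
--     return best[1], dist(best), best[2]
-- ===== Notes on version B (the rewrite author's own statement) =====
-- stated objective: alternative
-- what changed: B replaces A's staged pipeline (extract a frames key list, bisect_left over it for an insertion index, build a candidate list, min() with an abs key) by a single divide-and-conquer recursion on list halves that carries the two neighbour candidate elements through the recursion and picks the best with one explicit comparison; no index arithmetic, no intermediate lists, no min().
import Mathlib
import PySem

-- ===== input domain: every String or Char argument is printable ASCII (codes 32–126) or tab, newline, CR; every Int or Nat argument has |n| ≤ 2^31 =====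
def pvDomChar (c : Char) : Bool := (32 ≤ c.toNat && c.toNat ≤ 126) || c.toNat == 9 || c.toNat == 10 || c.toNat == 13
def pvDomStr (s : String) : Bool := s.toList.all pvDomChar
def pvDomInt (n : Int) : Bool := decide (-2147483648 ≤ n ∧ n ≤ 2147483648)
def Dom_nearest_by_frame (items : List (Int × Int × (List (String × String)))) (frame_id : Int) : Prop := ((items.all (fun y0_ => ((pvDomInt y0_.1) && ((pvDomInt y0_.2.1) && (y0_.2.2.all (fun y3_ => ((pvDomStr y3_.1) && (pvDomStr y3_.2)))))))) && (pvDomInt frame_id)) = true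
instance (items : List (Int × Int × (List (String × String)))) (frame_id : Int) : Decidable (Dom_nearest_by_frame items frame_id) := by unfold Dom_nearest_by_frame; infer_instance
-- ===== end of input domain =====

-- B replaces A's staged pipeline (frames key list + bisect_left index + candidate
-- list + min with abs key) by one divide-and-conquer recursion on list halves that
-- carries the two neighbour candidate elements (objective: alternative; same cost).

-- ===== PORT A =====
-- Port of Python's bisect_left(a, x, 0, len(a)). Python's lo/hi are nonnegative ints
-- throughout, so Nat lo/hi with Nat division (lo+hi)/2 is exact here.
def pvBisectLeft (a : List Int) (x : Int) (lo hi : Nat) : Nat :=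
  if _h : lo < hi then
    if a.getD ((lo + hi) / 2) 0 < x then pvBisectLeft a x ((lo + hi) / 2 + 1) hi
    else pvBisectLeft a x lo ((lo + hi) / 2)
  else lo
termination_by hi - lo
decreasing_by all_goals omega

def nearest_by_frame (items : List (Int × Int × (List (String × String)))) (frame_id : Int) : Option Int × Option Int × (Option (List (String × String))) :=
  if items = [] then (none, none, none)
  else
    let frames := items.map (fun x => x.1)
    let pos := pvBisectLeft frames frame_id 0 items.length
    -- cand: append items[pos] if pos < len, then items[pos-1] if pos > 0 (in-range getD is exact)
    let cand := (if pos < items.length then [items.getD pos (0, 0, [])] else [])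
                ++ (if 0 < pos then [items.getD (pos - 1) (0, 0, [])] else [])
    match PySem.List.min? cand (fun x => |x.1 - frame_id|) with
    | none => (none, none, none)   -- unreachable: cand nonempty (Python min would raise on [])
    | some best => (some best.2.1, some |best.1 - frame_id|, some best.2.2)

-- ===== PORT B =====
-- Source B's go(seg, lcand, rcand): recursion on list halves carrying the two
-- neighbour candidates; seg[m+1:] / seg[:m] are in-range slices, ported as drop/take.
def pvGo (frame_id : Int) (seg : List (Int × Int × (List (String × String))))
    (lcand rcand : Option (Int × Int × (List (String × String)))) :
    Option (Int × Int × (List (String × String))) :=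
  if _h : seg = [] then
    match rcand, lcand with
    | none, _ => lcand
    | some r, none => some r
    | some r, some l => if |r.1 - frame_id| ≤ |l.1 - frame_id| then some r else some l
  else
    let m := seg.length / 2
    if (seg.getD m (0, 0, [])).1 < frame_id then
      pvGo frame_id (seg.drop (m + 1)) (some (seg.getD m (0, 0, []))) rcand
    else
      pvGo frame_id (seg.take m) lcand (some (seg.getD m (0, 0, [])))
termination_by seg.length
decreasing_by
  · have : seg.length ≠ 0 := fun h => _h (List.eq_nil_of_length_eq_zero h)
    simp [List.length_drop]; omega
  · have : seg.length ≠ 0 := fun h => _h (List.eq_nil_of_length_eq_zero h)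
    simp [List.length_take]; omega

def nearest_by_frame_alt (items : List (Int × Int × (List (String × String)))) (frame_id : Int) : Option Int × Option Int × (Option (List (String × String))) :=
  if items = [] then (none, none, none)
  else
    match pvGo frame_id items none none with
    | none => (none, none, none)   -- unreachable: items nonempty, so go returns a candidate
    | some best => (some best.2.1, some |best.1 - frame_id|, some best.2.2)

-- ===== PRECONDITION & SPEC =====
def Spec_nearest_by_frame (items : List (Int × Int × (List (String × String)))) (frame_id : Int) (out : Option Int × Option Int × (Option (List (String × String)))) : Prop := out = nearest_by_frame_alt items frame_id
instance (items : List (Int × Int × (List (String × String)))) (frame_id : Int) (out : Option Int × Option Int × (Option (List (String × String)))) : Decidable (Spec_nearest_by_frame items frame_id out) := by unfold Spec_nearest_by_frame; infer_instance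

-- ===== CLAIM (what is proved, stated in full; the proofs are below) =====
def Claim_equal_nearest_by_frame : Prop := ∀ (items : List (Int × Int × (List (String × String)))) (frame_id : Int), Dom_nearest_by_frame items frame_id → Spec_nearest_by_frame items frame_id (nearest_by_frame items frame_id)

-- ===== LEMMAS AND PROOFS =====

-- left/right neighbour candidates at boundary index i of items (B's invariant state)
def pvOptL (items : List (Int × Int × (List (String × String)))) (i : Nat) : Option (Int × Int × (List (String × String))) :=
  if i = 0 then none else some (items.getD (i - 1) (0, 0, []))
def pvOptR (items : List (Int × Int × (List (String × String)))) (i : Nat) : Option (Int × Int × (List (String × String))) :=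
  if i = items.length then none else some (items.getD i (0, 0, []))

theorem pvBisectLeft_bounds (a : List Int) (x : Int) (lo hi : Nat) (h : lo ≤ hi) :
    lo ≤ pvBisectLeft a x lo hi ∧ pvBisectLeft a x lo hi ≤ hi := by
  fun_induction pvBisectLeft a x lo hi with
  | case1 lo hi hlh hlt ih => have := ih (by omega); omega
  | case2 lo hi hlh hlt ih => have := ih (by omega); omega
  | case3 lo hi hlh => omega

-- pvGo on the empty segment: the final candidate selection, spelled out
theorem pvGo_nil (fid : Int) (lcand rcand : Option (Int × Int × (List (String × String)))) :
    pvGo fid [] lcand rcand = match rcand, lcand with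
    | none, _ => lcand
    | some r, none => some r
    | some r, some l => if |r.1 - fid| ≤ |l.1 - fid| then some r else some l := by
  rw [pvGo.eq_def]; rfl

-- min over A's one- or two-element candidate list, spelled out
theorem min?_pair (a b : (Int × Int × (List (String × String)))) (k : (Int × Int × (List (String × String))) → Int) :
    PySem.List.min? [a, b] k = some (if k a ≤ k b then a else b) := by
  simp [PySem.List.min?]
  split_ifs with h1 h2 h2 <;> simp_all
  omega

theorem min?_single (a : (Int × Int × (List (String × String)))) (k : (Int × Int × (List (String × String))) → Int) :
    PySem.List.min? [a] k = some a := by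
  simp [PySem.List.min?]

theorem pvGo_invariant (items : List (Int × Int × (List (String × String)))) (fid : Int) :
    ∀ (lo hi : Nat), lo ≤ hi → hi ≤ items.length →
    pvGo fid ((items.take hi).drop lo) (pvOptL items lo) (pvOptR items hi)
      = pvGo fid [] (pvOptL items (pvBisectLeft (items.map (fun x => x.1)) fid lo hi))
                    (pvOptR items (pvBisectLeft (items.map (fun x => x.1)) fid lo hi)) := by
  intro lo hi
  induction hlt : hi - lo using Nat.strong_induction_on generalizing lo hi with
  | _ n ih =>
  intro hle hhi
  by_cases hlh : lo < hi
  · have hseg : ((items.take hi).drop lo).length = hi - lo := by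
      simp [List.length_drop, List.length_take]; omega
    have hne : (items.take hi).drop lo ≠ [] := by
      intro h; rw [h] at hseg; simp at hseg; omega
    have hm : (hi - lo) / 2 < hi - lo := by omega
    have hmid : lo + (hi - lo) / 2 = (lo + hi) / 2 := by omega
    have hmlt : lo + (hi - lo) / 2 < items.length := by omega
    have hget : ((items.take hi).drop lo).getD ((hi - lo) / 2) (0, 0, [])
        = items.getD (lo + (hi - lo) / 2) (0, 0, []) := by
      have h1 : (hi - lo) / 2 < ((items.take hi).drop lo).length := by omega
      rw [List.getD_eq_getElem _ _ h1, List.getD_eq_getElem _ _ hmlt]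
      simp [List.getElem_drop, List.getElem_take]
    have hm2 : (lo + hi) / 2 < items.length := by omega
    have hframes : (items.map (fun x => x.1)).getD ((lo + hi) / 2) 0
        = (items.getD ((lo + hi) / 2) (0, 0, [])).1 := by
      simp [hm2]
    rw [pvGo.eq_def, dif_neg hne]
    rw [pvBisectLeft, dif_pos hlh]
    simp only [hseg]
    rw [hget]
    by_cases hc : (items.getD (lo + (hi - lo) / 2) (0, 0, [])).1 < fid
    · rw [if_pos hc, if_pos (by rw [hframes, ← hmid]; exact hc)]
      -- right half: drop (m+1) of the segment = segment [lo+m+1, hi)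
      have hdrop : ((items.take hi).drop lo).drop ((hi - lo) / 2 + 1)
          = (items.take hi).drop (lo + ((hi - lo) / 2 + 1)) := by
        rw [List.drop_drop]
      have hlc : some (items.getD (lo + (hi - lo) / 2) (0, 0, []))
          = pvOptL items (lo + (hi - lo) / 2 + 1) := by
        simp [pvOptL]
      rw [hdrop, hlc]
      have := ih (hi - (lo + ((hi - lo) / 2 + 1))) (by omega) (lo + ((hi - lo) / 2 + 1)) hi rfl (by omega) hhi
      rw [show lo + ((hi - lo) / 2 + 1) = lo + (hi - lo) / 2 + 1 by omega] at this ⊢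
      rw [this, show lo + (hi - lo) / 2 + 1 = (lo + hi) / 2 + 1 by omega]
    · rw [if_neg hc, if_neg (by rw [hframes, ← hmid]; exact hc)]
      -- left half: take m of the segment = segment [lo, lo+m)
      have htake : ((items.take hi).drop lo).take ((hi - lo) / 2)
          = (items.take (lo + (hi - lo) / 2)).drop lo := by
        rw [List.take_drop, Nat.add_comm lo ((hi-lo)/2), List.take_take,
            Nat.min_eq_left (by omega : (hi - lo) / 2 + lo ≤ hi), Nat.add_comm]
      have hrc : some (items.getD (lo + (hi - lo) / 2) (0, 0, []))
          = pvOptR items (lo + (hi - lo) / 2) := by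
        simp [pvOptR]; omega
      rw [htake, hrc]
      have := ih (lo + (hi - lo) / 2 - lo) (by omega) lo (lo + (hi - lo) / 2) rfl (by omega) (by omega)
      rw [this, hmid]
  · have hEq : lo = hi := by omega
    subst hEq
    rw [pvBisectLeft, dif_neg (by omega)]
    congr 1
    simp

-- ===== VERDICT (by name: the statement is the Claim_ definition above) =====
theorem nearest_by_frame_spec : Claim_equal_nearest_by_frame := by
  intro items frame_id _
  unfold Spec_nearest_by_frame nearest_by_frame nearest_by_frame_alt
  by_cases hnil : items = []
  · simp [hnil]
  · simp only [if_neg hnil]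
    have hlen : 0 < items.length := List.length_pos_iff.mpr hnil
    have h0 := pvGo_invariant items frame_id 0 items.length (by omega) le_rfl
    simp only [List.drop_zero, List.take_length] at h0
    have hL : pvOptL items 0 = none := by simp [pvOptL]
    have hR : pvOptR items items.length = none := by simp [pvOptR]
    rw [hL, hR] at h0
    have hb := pvBisectLeft_bounds (items.map (fun x => x.1)) frame_id 0 items.length (by omega)
    rw [h0, pvGo_nil]
    generalize pvBisectLeft (items.map (fun x => x.1)) frame_id 0 items.length = pos at hb
    by_cases h1 : pos = items.length
    · subst h1
      rw [if_neg (by omega : ¬ items.length < items.length), if_pos hlen,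
        List.nil_append, min?_single]
      simp [pvOptL, pvOptR, show items.length ≠ 0 by omega]
    · by_cases h02 : pos = 0
      · subst h02
        rw [if_pos hlen, if_neg (by omega : ¬ (0:Nat) < 0), List.append_nil, min?_single]
        simp [pvOptL, pvOptR, h1]
      · rw [if_pos (by omega), if_pos (by omega)]
        rw [show ([items.getD pos (0,0,[])] ++ [items.getD (pos-1) (0,0,[])]) = [items.getD pos (0,0,[]), items.getD (pos-1) (0,0,[])] from rfl, min?_pair]
        simp only [pvOptL, pvOptR, if_neg h02, if_neg h1]
        split_ifs with hc <;> simp
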